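-- pv_equiv track=rewrite | github.com/temaEmelyan/codeWarsPy | codeWarsPy/kyu_6/ARuleOfDivisibilityBy13.py | thirt
-- ===== SOURCE A (Python) =====
-- def thirt(n):
--     seq = [1, 10, 9, 12, 3, 4]
--     s = list(str(n))
--     s.reverse()
--     s = ''.join(s)
--
--     prev = 0
--     while 1:
--         summ = 0
--         for i in range(len(s)):
--             summ += int(s[i]) * seq[i % len(seq)]
--         if prev == summ:
--             return summ
--         else:
--             prev = summ
--             s = list(str(prev))
--             s.reverse()
--             s = ''.join(s)
-- ===== SOURCE B (Python) =====
-- def thirt(n):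
--     seq = (1, 10, 9, 12, 3, 4)
--
--     def wsum(m, i=0):
--         if m == 0:
--             return 0
--         return m % 10 * seq[i % 6] + wsum(m // 10, i + 1)
--
--     s = wsum(n)
--     return n if s == n else thirt(s)
-- ===== Notes on version B (the rewrite author's own statement) =====
-- stated objective: alternative
-- what changed: A repeatedly converts the value to a string, reverses it and re-parses every character inside an index loop with a prev accumulator; B is pure arithmetic: a recursive divmod-based helper computes the weighted digit sum with no string conversion, and the fixed point is reached by tail recursion on the sum instead of a while loop with prev.
import Mathlib
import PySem

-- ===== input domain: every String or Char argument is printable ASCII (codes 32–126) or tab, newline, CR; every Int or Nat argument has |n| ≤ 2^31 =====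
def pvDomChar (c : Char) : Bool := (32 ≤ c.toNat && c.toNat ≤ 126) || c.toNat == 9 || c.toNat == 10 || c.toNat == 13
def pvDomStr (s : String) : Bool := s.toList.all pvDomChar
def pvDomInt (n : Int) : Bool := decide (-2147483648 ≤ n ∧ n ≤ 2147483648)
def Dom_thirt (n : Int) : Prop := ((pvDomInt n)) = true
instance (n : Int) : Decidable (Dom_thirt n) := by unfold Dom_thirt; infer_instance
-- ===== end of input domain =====

-- B replaces A's string-reverse-and-reparse loop by a pure divmod recursion; same value on every n ≥ 0 (A raises ValueError on n < 0).

-- ===== PORT A =====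
def seqA : List Int := [1, 10, 9, 12, 3, 4]

-- int(s[i]) where s[i] is one char; exact on the digit chars reached under Pre_ (a non-digit char makes Python raise ValueError, excluded by Pre_)
def intAt (cs : List Char) (i : Int) : Int :=
  ((PySem.List.pyGet? cs i).bind (fun c => PySem.Int.ofChars? [c])).getD 0

-- the inner 'for i in range(len(s)): summ += int(s[i]) * seq[i % len(seq)]'
def innerSum (cs : List Char) : Int :=
  (PySem.List.pyRange 0 (PySem.List.len cs) 1).foldl
    (fun summ i => summ + intAt cs i * PySem.List.pyGetD seqA (PySem.Int.mod i (PySem.List.len seqA)) 0) 0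

-- the 'while 1' loop; fuel is a totality guard only: on Pre_ the loop runs at most n+2 rounds, so fuel n.toNat+2 is never exhausted
def loopA : Nat → Int → List Char → Int
  | 0, _, _ => 0
  | f + 1, prev, s =>
      let summ := innerSum s
      if prev = summ then summ
      else loopA f summ (PySem.Int.toChars summ).reverse

def thirt (n : Int) : Int :=
  loopA (n.toNat + 2) 0 (PySem.Int.toChars n).reverse

-- ===== PORT B =====
def seqB : List Int := [1, 10, 9, 12, 3, 4]

-- wsum(m, i): weighted digit sum by repeated divmod, least-significant digit first.
-- The fuel is a totality guard only: wsum passes m.toNat + 1, more than the recursion depth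
-- (Python B never returns from wsum on m < 0 — RecursionError — and those inputs are outside Pre_).
def wsumF : Nat → Int → Nat → Int
  | 0, _, _ => 0
  | f + 1, m, i =>
      if m ≤ 0 then 0
      else PySem.Int.mod m 10 * PySem.List.pyGetD seqB (PySem.Int.mod (i : Int) 6) 0
           + wsumF f (PySem.Int.floordiv m 10) (i + 1)

def wsum (m : Int) (i : Nat) : Int := wsumF (m.toNat + 1) m i

-- 'return n if s == n else thirt(s)'; fuel n.toNat + 2 is a totality guard only (the value
-- strictly decreases each round on Pre_, so at most n + 2 rounds happen)
def altGo : Nat → Int → Int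
  | 0, _ => 0
  | f + 1, n =>
      let s := wsum n 0
      if s = n then n else altGo f s

def thirt_alt (n : Int) : Int := altGo (n.toNat + 2) n

-- ===== PRECONDITION & SPEC =====
-- Pre_ excludes n < 0: there str(n) starts with '-' and A raises ValueError at int('-')
def Pre_thirt (n : Int) : Prop := 0 ≤ n
instance (n : Int) : Decidable (Pre_thirt n) := by unfold Pre_thirt; infer_instance
def pvWitness_thirt : Int := 13

def Spec_thirt (n : Int) (out : Int) : Prop := out = thirt_alt n
instance (n : Int) (out : Int) : Decidable (Spec_thirt n out) := by unfold Spec_thirt; infer_instance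

-- ===== CLAIM (what is proved, stated in full; the proofs are below) =====
def Claim_equal_thirt : Prop := ∀ (n : Int), Dom_thirt n → Pre_thirt n → Spec_thirt n (thirt n)

-- ===== LEMMAS AND PROOFS =====

theorem wsum_dec (m : Int) (h : ¬ m ≤ 0) : (PySem.Int.floordiv m 10).toNat < m.toNat := by
  have h10 : PySem.Int.floordiv m 10 = m / 10 := PySem.Int.floordiv_eq_ediv_of_pos (by norm_num)
  rw [h10]; omega

theorem wsumF_congr : ∀ (f1 f2 : Nat) (m : Int) (i : Nat), m.toNat < f1 → m.toNat < f2 →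
    wsumF f1 m i = wsumF f2 m i := by
  intro f1
  induction f1 with
  | zero => intro f2 m i h1; omega
  | succ g ih =>
    intro f2 m i h1 h2
    cases f2 with
    | zero => omega
    | succ h =>
      show wsumF (g + 1) m i = wsumF (h + 1) m i
      by_cases hm : m ≤ 0
      · simp [wsumF, hm]
      · have hd := wsum_dec m hm
        simp only [wsumF, if_neg hm]
        rw [ih h (PySem.Int.floordiv m 10) (i + 1) (by omega) (by omega)]

theorem wsum_eq (m : Int) (i : Nat) :
    wsum m i = if m ≤ 0 then 0
      else PySem.Int.mod m 10 * PySem.List.pyGetD seqB (PySem.Int.mod (i : Int) 6) 0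
           + wsum (PySem.Int.floordiv m 10) (i + 1) := by
  by_cases hm : m ≤ 0
  · simp [wsum, wsumF, hm]
  · have hd := wsum_dec m hm
    rw [if_neg hm]
    show wsumF (m.toNat + 1) m i = _
    simp only [wsumF, if_neg hm]
    rw [wsumF_congr m.toNat ((PySem.Int.floordiv m 10).toNat + 1) (PySem.Int.floordiv m 10) (i + 1)
      (by omega) (by omega)]
    rfl

theorem seqB_getD_bounds (j : Nat) : 1 ≤ seqB.getD (j % 6) 0 ∧ seqB.getD (j % 6) 0 ≤ 12 := by
  have h : j % 6 < 6 := Nat.mod_lt _ (by norm_num)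
  set k := j % 6 with hk
  interval_cases k <;> simp [seqB]

theorem wB_cast (i : Nat) :
    PySem.List.pyGetD seqB (PySem.Int.mod (i : Int) 6) 0 = seqB.getD (i % 6) 0 := by
  have h : PySem.Int.mod (i : Int) 6 = ((i % 6 : Nat) : Int) := by
    exact_mod_cast PySem.Int.mod_natCast i 6
  rw [h, PySem.List.pyGetD_natCast]

theorem wsum_nonneg_aux : ∀ (k : Nat) (m : Int), m.toNat ≤ k → ∀ i : Nat, 0 ≤ wsum m i := by
  intro k
  induction k with
  | zero =>
    intro m hk i
    rw [wsum_eq, if_pos (by omega)]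
  | succ k ih =>
    intro m hk i
    rw [wsum_eq]
    by_cases hm : m ≤ 0
    · rw [if_pos hm]
    · rw [if_neg hm, wB_cast]
      have hd := wsum_dec m hm
      have h1 := ih (PySem.Int.floordiv m 10) (by omega) (i + 1)
      have h2 : 0 ≤ PySem.Int.mod m 10 := PySem.Int.mod_nonneg m (by norm_num)
      have h3 := (seqB_getD_bounds i).1
      nlinarith

theorem wsum_nonneg (m : Int) (i : Nat) : 0 ≤ wsum m i :=
  wsum_nonneg_aux m.toNat m le_rfl i

theorem wsum_le_aux : ∀ (k : Nat) (m : Int), m.toNat ≤ k → 0 ≤ m → ∀ i : Nat, wsum m i ≤ 12 * m := by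
  intro k
  induction k with
  | zero =>
    intro m hk hm i
    rw [wsum_eq, if_pos (by omega)]; omega
  | succ k ih =>
    intro m hk hm i
    rw [wsum_eq]
    by_cases h0 : m ≤ 0
    · rw [if_pos h0]; omega
    · rw [if_neg h0, wB_cast]
      have hmod : PySem.Int.mod m 10 = m % 10 := PySem.Int.mod_eq_emod_of_pos (by norm_num)
      have hdiv : PySem.Int.floordiv m 10 = m / 10 := PySem.Int.floordiv_eq_ediv_of_pos (by norm_num)
      have hd := wsum_dec m h0
      have ih' := ih (PySem.Int.floordiv m 10) (by omega) (by rw [hdiv]; omega) (i + 1)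
      rw [hdiv] at ih'
      rw [hmod, hdiv]
      have hw := (seqB_getD_bounds i).1
      have hw2 := (seqB_getD_bounds i).2
      have h1 : m % 10 * seqB.getD (i % 6) 0 ≤ m % 10 * 12 := by
        have : (0:Int) ≤ m % 10 := by omega
        nlinarith
      omega

theorem wsum_le (m : Int) (i : Nat) (hm : 0 ≤ m) : wsum m i ≤ 12 * m :=
  wsum_le_aux m.toNat m le_rfl hm i

theorem wsum_pos_aux : ∀ (k : Nat) (m : Int), m.toNat ≤ k → ∀ i : Nat, 0 < m → 0 < wsum m i := by
  intro k
  induction k with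
  | zero => intro m hk i h; omega
  | succ k ih =>
    intro m hk i h
    rw [wsum_eq, if_neg (by omega), wB_cast]
    have hmod : PySem.Int.mod m 10 = m % 10 := PySem.Int.mod_eq_emod_of_pos (by norm_num)
    have hdiv : PySem.Int.floordiv m 10 = m / 10 := PySem.Int.floordiv_eq_ediv_of_pos (by norm_num)
    have hd := wsum_dec m (by omega)
    have hw := (seqB_getD_bounds i).1
    rw [hmod, hdiv]
    by_cases hm0 : m % 10 = 0
    · have hrec := ih (PySem.Int.floordiv m 10) (by omega) (i + 1) (by rw [hdiv]; omega)
      rw [hdiv] at hrec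
      rw [hm0, zero_mul]
      omega
    · have h1 : (1:Int) ≤ m % 10 := by omega
      have hfirst : (1:Int) ≤ m % 10 * seqB.getD (i % 6) 0 := by nlinarith
      have hrest := wsum_nonneg (m / 10) (i + 1)
      rw [← hdiv] at hrest
      rw [hdiv] at hrest
      omega

theorem wsum_pos (m : Int) (i : Nat) (h : 0 < m) : 0 < wsum m i :=
  wsum_pos_aux m.toNat m le_rfl i h

theorem wsum_eq_self (m : Int) (h0 : 0 ≤ m) (h : m < 100) : wsum m 0 = m := by
  have hmod : ∀ a : Int, PySem.Int.mod a 10 = a % 10 := fun a => PySem.Int.mod_eq_emod_of_pos (by norm_num)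
  have hdiv : ∀ a : Int, PySem.Int.floordiv a 10 = a / 10 := fun a => PySem.Int.floordiv_eq_ediv_of_pos (by norm_num)
  rcases eq_or_lt_of_le h0 with h0' | h0'
  · rw [wsum_eq, if_pos (by omega)]; omega
  · rw [wsum_eq, if_neg (by omega), wB_cast, hmod, hdiv]
    have w0 : seqB.getD (0 % 6) 0 = 1 := by decide
    rw [w0]
    by_cases h10 : m < 10
    · rw [wsum_eq, if_pos (by omega : m / 10 ≤ 0)]; omega
    · rw [wsum_eq, if_neg (by omega : ¬ m / 10 ≤ 0), wB_cast, hmod, hdiv]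
      have w1 : seqB.getD ((0 + 1) % 6) 0 = 10 := by decide
      rw [w1, wsum_eq, if_pos (by omega : m / 10 / 10 ≤ 0)]
      omega

theorem wsum_lt_self (m : Int) (h : 100 ≤ m) : wsum m 0 < m := by
  have hmod : ∀ a : Int, PySem.Int.mod a 10 = a % 10 := fun a => PySem.Int.mod_eq_emod_of_pos (by norm_num)
  have hdiv : ∀ a : Int, PySem.Int.floordiv a 10 = a / 10 := fun a => PySem.Int.floordiv_eq_ediv_of_pos (by norm_num)
  rw [wsum_eq, if_neg (by omega), wB_cast, hmod, hdiv]
  have w0 : seqB.getD (0 % 6) 0 = 1 := by decide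
  rw [w0, wsum_eq, if_neg (by omega : ¬ m / 10 ≤ 0), wB_cast, hmod, hdiv]
  have w1 : seqB.getD ((0 + 1) % 6) 0 = 10 := by decide
  rw [w1]
  have h2 : (0 + 1 + 1 : Nat) = 2 := rfl
  rw [h2]
  have hle := wsum_le (m / 10 / 10) 2 (by omega)
  omega

theorem wsum_step_lt (n : Int) (h0 : 0 < n) (hne : wsum n 0 ≠ n) : wsum n 0 < n := by
  by_cases h : n < 100
  · exact absurd (wsum_eq_self n (by omega) h) hne
  · exact wsum_lt_self n (by omega)

theorem altGo_step (f : Nat) (v : Int) :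
    altGo (f + 1) v = if wsum v 0 = v then v else altGo f (wsum v 0) := rfl

theorem wsum_zero : wsum (0:Int) 0 = 0 := by rw [wsum_eq]; simp

theorem altGo_congr : ∀ (f1 f2 : Nat) (v : Int), 0 ≤ v → v.toNat < f1 → v.toNat < f2 →
    altGo f1 v = altGo f2 v := by
  intro f1
  induction f1 with
  | zero => intro f2 v hv h1; omega
  | succ g ih =>
    intro f2 v hv h1 h2
    cases f2 with
    | zero => omega
    | succ h =>
      rw [altGo_step, altGo_step]
      by_cases he : wsum v 0 = v
      · rw [if_pos he, if_pos he]
      · rw [if_neg he, if_neg he]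
        have hvpos : 0 < v := by
          rcases eq_or_lt_of_le hv with h0 | h0
          · exfalso; apply he; rw [← h0, wsum_zero]
          · exact h0
        have hlt := wsum_step_lt v hvpos he
        have hnn := wsum_nonneg v 0
        exact ih h (wsum v 0) hnn (by omega) (by omega)

theorem thirt_alt_unfold (n : Int) (hn : 0 ≤ n) :
    thirt_alt n = if wsum n 0 = n then n else thirt_alt (wsum n 0) := by
  show altGo (n.toNat + 2) n = _
  rw [show n.toNat + 2 = (n.toNat + 1) + 1 from rfl, altGo_step]
  by_cases he : wsum n 0 = n
  · rw [if_pos he, if_pos he]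
  · rw [if_neg he, if_neg he]
    have hnpos : 0 < n := by
      rcases eq_or_lt_of_le hn with h0 | h0
      · exfalso; apply he; rw [← h0, wsum_zero]
      · exact h0
    have hlt := wsum_step_lt n hnpos he
    have hnn := wsum_nonneg n 0
    exact altGo_congr (n.toNat + 1) ((wsum n 0).toNat + 2) (wsum n 0) hnn (by omega) (by omega)

-- most-significant-first decimal digit characters; Nat.toDigits computes exactly this
def msbDigits (n : Nat) : List Char :=
  if h : n < 10 then [Nat.digitChar n]
  else msbDigits (n / 10) ++ [Nat.digitChar (n % 10)]
termination_by n
decreasing_by omega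

theorem toDigitsCore_eq (f : Nat) : ∀ (n : Nat) (ds : List Char), n < f →
    Nat.toDigitsCore 10 f n ds = msbDigits n ++ ds := by
  induction f with
  | zero => intro n ds h; omega
  | succ f ih =>
    intro n ds h
    by_cases h10 : n < 10
    · have hz : n / 10 = 0 := Nat.div_eq_of_lt h10
      simp [Nat.toDigitsCore, hz, msbDigits, h10, Nat.mod_eq_of_lt h10]
    · have hd : ¬ n / 10 = 0 := by omega
      simp only [Nat.toDigitsCore, hd, if_false]
      rw [ih (n / 10) _ (by omega)]
      conv_rhs => rw [msbDigits]
      rw [dif_neg h10]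
      simp

theorem toChars_nonneg (m : Nat) : PySem.Int.toChars (m : Int) = msbDigits m := by
  have : ¬ ((m : Int) < 0) := by omega
  simp only [PySem.Int.toChars, this, if_false, Int.toNat_natCast]
  rw [Nat.toDigits, toDigitsCore_eq (m + 1) m [] (by omega), List.append_nil]

theorem digit_parse (d : Nat) (h : d < 10) :
    (PySem.Int.ofChars? [Nat.digitChar d]).getD 0 = (d : Int) := by
  interval_cases d <;> decide

-- the reversed-string weighted sum, structurally
def asumGo : List Char → Nat → Int
  | [], _ => 0
  | c :: t, k => (PySem.Int.ofChars? [c]).getD 0 * seqA.getD (k % 6) 0 + asumGo t (k + 1)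

theorem fold_inner (full : List Char) : ∀ (k : Nat) (acc : Int), k ≤ full.length →
    (PySem.List.pyRange (k : Int) (full.length : Int) 1).foldl
      (fun summ i => summ + intAt full i * PySem.List.pyGetD seqA (PySem.Int.mod i (PySem.List.len seqA)) 0) acc
    = acc + asumGo (full.drop k) k := by
  intro k acc hk
  induction hlen : full.length - k generalizing k acc with
  | zero =>
    have hke : k = full.length := by omega
    rw [PySem.List.pyRange_one_eq_nil (by exact_mod_cast le_of_eq hke.symm)]
    simp [hke, asumGo, List.drop_of_length_le]
  | succ t ih =>
    have hklt : k < full.length := by omega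
    rw [PySem.List.pyRange_one_cons (by exact_mod_cast hklt)]
    simp only [List.foldl_cons]
    have hcast : (k : Int) + 1 = ((k + 1 : Nat) : Int) := by push_cast; ring
    rw [hcast, ih (k + 1) _ (by omega) (by omega)]
    have hget : intAt full (k : Int) = (PySem.Int.ofChars? [full[k]]).getD 0 := by
      simp [intAt, PySem.List.pyGet?_natCast, hklt, List.getElem?_eq_getElem hklt]
    have hw : PySem.List.pyGetD seqA (PySem.Int.mod (k : Int) (PySem.List.len seqA)) 0
        = seqA.getD (k % 6) 0 := by
      have h6 : PySem.List.len seqA = ((6 : Nat) : Int) := by decide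
      rw [h6]
      have h : PySem.Int.mod (k : Int) ((6 : Nat) : Int) = ((k % 6 : Nat) : Int) :=
        PySem.Int.mod_natCast k 6
      rw [h, PySem.List.pyGetD_natCast]
    rw [hget, hw, List.drop_eq_getElem_cons hklt]
    simp [asumGo]
    ring
  
theorem inner_eq_asum (cs : List Char) : innerSum cs = asumGo cs 0 := by
  have h := fold_inner cs 0 0 (by omega)
  simpa [innerSum, PySem.List.len_eq] using h

theorem seqAB (j : Nat) : seqA.getD j 0 = seqB.getD j 0 := rfl

theorem asum_rev (m : Nat) : ∀ i : Nat, asumGo ((msbDigits m).reverse) i = wsum (m : Int) i := by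
  induction m using Nat.strong_induction_on with
  | _ m ihm =>
    intro i
    by_cases h10 : m < 10
    · rw [msbDigits, dif_pos h10]
      rcases Nat.eq_zero_or_pos m with hm0 | hmp
      · subst hm0
        rw [wsum_eq, if_pos (by omega)]
        simp [asumGo, digit_parse 0 (by omega)]
      · rw [wsum_eq, if_neg (by omega : ¬ (m : Int) ≤ 0), wB_cast]
        have hmod : PySem.Int.mod (m : Int) 10 = ((m % 10 : Nat) : Int) := by
          exact_mod_cast PySem.Int.mod_natCast m 10
        have hdiv : PySem.Int.floordiv (m : Int) 10 = ((m / 10 : Nat) : Int) := by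
          exact_mod_cast PySem.Int.floordiv_natCast m 10
        rw [hmod, hdiv]
        have hz : m / 10 = 0 := Nat.div_eq_of_lt h10
        rw [hz, wsum_eq, if_pos (by omega)]
        simp [asumGo, digit_parse m h10, Nat.mod_eq_of_lt h10]
        exact Or.inl rfl
    · rw [msbDigits, dif_neg h10]
      rw [List.reverse_append]
      simp only [List.reverse_singleton, List.singleton_append]
      rw [wsum_eq, if_neg (by omega : ¬ (m : Int) ≤ 0), wB_cast]
      have hmod : PySem.Int.mod (m : Int) 10 = ((m % 10 : Nat) : Int) := by
        exact_mod_cast PySem.Int.mod_natCast m 10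
      have hdiv : PySem.Int.floordiv (m : Int) 10 = ((m / 10 : Nat) : Int) := by
        exact_mod_cast PySem.Int.floordiv_natCast m 10
      rw [hmod, hdiv]
      simp only [asumGo]
      rw [digit_parse (m % 10) (by omega), ihm (m / 10) (by omega) (i + 1), seqAB]

theorem inner_wsum (v : Int) (hv : 0 ≤ v) : innerSum ((PySem.Int.toChars v).reverse) = wsum v 0 := by
  have hvn : v = ((v.toNat : Nat) : Int) := by omega
  rw [hvn, toChars_nonneg, inner_eq_asum, asum_rev]

theorem loopA_step (f : Nat) (prev : Int) (s : List Char) :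
    loopA (f + 1) prev s = if prev = innerSum s then innerSum s
      else loopA f (innerSum s) (PySem.Int.toChars (innerSum s)).reverse := rfl

theorem loopA_eq (f : Nat) : ∀ v : Int, 0 < v → v.toNat < f →
    loopA f v (PySem.Int.toChars v).reverse = thirt_alt v := by
  induction f with
  | zero => intro v hv hf; omega
  | succ f ih =>
    intro v hv hf
    have hsum : innerSum ((PySem.Int.toChars v).reverse) = wsum v 0 := inner_wsum v (by omega)
    rw [loopA_step, hsum]
    by_cases hev : v = wsum v 0
    · rw [if_pos hev, thirt_alt_unfold v (by omega), if_pos hev.symm]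
      exact hev.symm
    · rw [if_neg hev]
      have hpos : 0 < wsum v 0 := wsum_pos v 0 hv
      have hlt : wsum v 0 < v := wsum_step_lt v hv (fun he => hev he.symm)
      rw [ih (wsum v 0) hpos (by omega)]
      rw [thirt_alt_unfold v (by omega), if_neg (fun he => hev he.symm)]

theorem thirt_spec' (n : Int) (h : 0 ≤ n) : thirt n = thirt_alt n := by
  have hz : wsum (0:Int) 0 = 0 := wsum_zero
  have hsum : innerSum ((PySem.Int.toChars n).reverse) = wsum n 0 := inner_wsum n h
  show loopA (n.toNat + 2) 0 (PySem.Int.toChars n).reverse = thirt_alt n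
  rw [show n.toNat + 2 = (n.toNat + 1) + 1 from rfl]
  rw [loopA_step, hsum]
  by_cases h0 : (0:Int) = wsum n 0
  · rw [if_pos h0]
    have hn0 : n = 0 := by
      by_contra hne
      have hp : 0 < n := by omega
      have := wsum_pos n 0 hp
      omega
    subst hn0
    rw [thirt_alt_unfold 0 le_rfl, if_pos hz, hz]
  · rw [if_neg h0]
    have hnpos : 0 < n := by
      rcases eq_or_lt_of_le h with he | hp
      · exfalso; apply h0; rw [← he, hz]
      · exact hp
    have hpos : 0 < wsum n 0 := by
      have := wsum_nonneg n 0
      omega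
    have hle : wsum n 0 ≤ n := by
      by_cases hlt : n < 100
      · rw [wsum_eq_self n h hlt]
      · exact le_of_lt (wsum_lt_self n (by omega))
    rw [loopA_eq (n.toNat + 1) (wsum n 0) hpos (by omega)]
    by_cases hfix : wsum n 0 = n
    · rw [hfix]
    · rw [thirt_alt_unfold n h, if_neg hfix]

-- ===== VERDICT (by name: the statement is the Claim_ definition above) =====
theorem thirt_spec : Claim_equal_thirt := by
  intro n _ hpre
  exact thirt_spec' n hpre
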